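-- pv_equiv track=rewrite | github.com/nixternal/CodingChallenges | Codyssi/2025/06.py | part_three
-- ===== SOURCE A (Python) =====
-- def get_char_value(char: str) -> int:
--     """
--     Calculate the value of a character based on its position in the alphabet.
--
--     Args:
--         char (str): A single character
--
--     Returns:
--         int: The value of the character (1-52) or None if not a letter
--
--     Examples:
--         >>> get_char_value('a')
--         1
--         >>> get_char_value('z')
--         26
--         >>> get_char_value('A')
--         27
--         >>> get_char_value('Z')
--         52
--         >>> get_char_value('3')
--         None
--     """
--
--     if char.islower():
--         return ord(char) - 96  # 'a' is ASCII 97, so a=1, b=2, etc.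
--     elif char.isupper():
--         return ord(char) - 38  # 'A' is ASCII 65, so A=27, B=28, etc.
--     return 0
--
-- def fix_corrupted_char(preceding_val) -> int:
--     """
--     Fix a corrupted character value using the formula: 2*previous_value - 5.
--     Adjusts the result to stay within the range 1-52.
--
--     Args:
--         preceding_val (int): The value of the preceding character
--
--     Returns:
--         int: The fixed value of the corrupted character
--
--     Examples:
--         >>> fix_corrupted_char(10)  # 2*10 - 5 = 15
--         15
--         >>> fix_corrupted_char(2)   # 2*2 - 5 = -1, adjusted to 51
--         51
--         >>> fix_corrupted_char(30)  # 2*30 - 5 = 55, adjusted to 3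
--         3
--     """
--
--     # Apply corruption repair formula
--     value = preceding_val * 2 - 5
--
--     # Adjust value to stay within range 1-52 (wrapping around if necessary)
--     while value < 1:
--         value += 52
--
--     while value > 52:
--         value -= 52
--
--     return value
--
-- def part_three(data: str) -> int:
--     """
--     Part 3: Calculate the sum of values after fixing corrupted characters.
--
--     For each non-alphabetic character, use the formula 2*previous_value - 5
--     to determine its value, adjusting to stay within range 1-52.
--
--     Args:
--         data (str): The puzzle input
--
--     Returns:
--         int: The sum of all character values after fixing corrupted characters
--     """
--
--     values = []
--
--     for i, char in enumerate(data):
--         value = get_char_value(char)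
--
--         if value > 0:
--             # Regular alphabetic character
--             values.append(value)
--         else:
--             # Corrupted character
--             if i > 0 and values:
--                 # Fix based on the previous character's value
--                 preceding_value = values[i - 1]
--                 fixed_value = fix_corrupted_char(preceding_value)
--                 values.append(fixed_value)
--             else:
--                 # If it is the 1st character & corrupted, default to 0
--                 values.append(0)
--
--     return sum(values)
-- ===== SOURCE B (Python) =====
-- def part_three(data: str) -> int:
--     # Run-based algorithm: materialize letter values (None = corrupted), then
--     # process each maximal corrupted run with a closed form: the t-th repaired
--     # char after base value b is (pow(2, t, 52) * (b - 5) + 4) % 52 + 1,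
--     # since 5 is the fixed point of x -> 2x - 5 and the wrap is mod 52.
--     vals = [
--         ord(c) - 96 if c.islower() else ord(c) - 38 if c.isupper() else None
--         for c in data
--     ]
--     total = 0
--     i, n = 0, len(vals)
--     while i < n:
--         v = vals[i]
--         if v is not None:
--             total += v
--             i += 1
--         else:
--             j = i + 1
--             while j < n and vals[j] is None:
--                 j += 1
--             if i == 0:
--                 # leading corrupted run: first char counts 0, rest from base 0
--                 total += sum((pow(2, t, 52) * -5 + 4) % 52 + 1 for t in range(1, j))
--             else:
--                 b = vals[i - 1]
--                 total += sum((pow(2, t, 52) * (b - 5) + 4) % 52 + 1 for t in range(1, j - i + 1))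
--             i = j
--     return total
-- ===== Notes on version B (the rewrite author's own statement) =====
-- stated objective: alternative
-- what changed: B materializes letter values once (None for corrupted chars) and then processes each maximal corrupted run in one step, summing it with a modular-exponentiation closed form (pow(2,t,52)*(base-5)+4) % 52 + 1 derived from the fixed point 5 of x->2x-5, instead of A's per-character list building and iterative while-loop wrapping.
import Mathlib
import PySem

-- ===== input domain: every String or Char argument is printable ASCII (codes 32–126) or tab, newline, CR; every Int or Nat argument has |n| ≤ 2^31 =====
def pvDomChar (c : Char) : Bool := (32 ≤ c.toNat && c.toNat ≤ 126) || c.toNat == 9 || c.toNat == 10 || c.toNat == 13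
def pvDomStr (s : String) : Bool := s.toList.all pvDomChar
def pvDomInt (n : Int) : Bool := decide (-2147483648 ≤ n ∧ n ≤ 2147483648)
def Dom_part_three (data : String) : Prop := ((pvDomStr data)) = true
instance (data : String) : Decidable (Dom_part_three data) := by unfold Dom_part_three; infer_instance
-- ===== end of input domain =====

-- B replaces A's per-character recurrence by a run-based algorithm: letter values are
-- materialized once, and each maximal corrupted run is summed with a modular-exponentiation
-- closed form (pow(2,t,52)*(b-5)+4) % 52 + 1 instead of iterating the repair formula.


-- ===== PORT A =====
-- get_char_value: islower/isupper branches, else 0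
def pvGetCharValue (c : Char) : Int :=
  if PySem.Chars.islower c then (c.toNat : Int) - 96
  else if PySem.Chars.isupper c then (c.toNat : Int) - 38
  else 0

-- 'while value < 1: value += 52'  (terminates: 1 - value decreases)
def pvFixUp (v : Int) : Int :=
  if v < 1 then pvFixUp (v + 52) else v
termination_by (1 - v).toNat
decreasing_by omega

-- 'while value > 52: value -= 52'
def pvFixDown (v : Int) : Int :=
  if v > 52 then pvFixDown (v - 52) else v
termination_by (v - 52).toNat
decreasing_by omega

def pvFixCorruptedChar (p : Int) : Int := pvFixDown (pvFixUp (p * 2 - 5))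

-- loop body of A's for-loop over enumerate(data); values[i-1] is always in range
-- (values has i elements at step i), so pyGetD's default 0 is never used
def pvStepA (values : List Int) (ic : Int × Char) : List Int :=
  let value := pvGetCharValue ic.2
  if value > 0 then values ++ [value]
  else if ic.1 > 0 ∧ values ≠ [] then
    values ++ [pvFixCorruptedChar (PySem.List.pyGetD values (ic.1 - 1) 0)]
  else values ++ [0]

def part_three (data : String) : Int :=
  ((PySem.List.enumerate data.toList 0).foldl pvStepA []).sum

-- ===== PORT B =====
-- letter value, None for corrupted (Source B's list comprehension element)
def pvValB (c : Char) : Option Int :=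
  if PySem.Chars.islower c then some ((c.toNat : Int) - 96)
  else if PySem.Chars.isupper c then some ((c.toNat : Int) - 38)
  else none

-- Source B's closed form for the t-th repaired char after base value b; pow(2,t,52) is PySem.Int.powMod
def pvG (t : Nat) (b : Int) : Int :=
  PySem.Int.mod (PySem.Int.powMod 2 t 52 * (b - 5) + 4) 52 + 1

-- Source B's inner 'while j < n and vals[j] is None: j += 1' scan (number of leading Nones)
def pvRunLen : List (Option Int) → Nat
  | none :: rest => pvRunLen rest + 1
  | _ => 0

-- Source B's outer while loop: letters are added directly; a corrupted run of length k+1 is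
-- summed at once with the closed form and skipped
def pvLoopB : List (Option Int) → Option Int → Int
  | [], _ => 0
  | some v :: rest, _ => v + pvLoopB rest (some v)
  | none :: rest, prev =>
      (match prev with
       | none => ((PySem.List.pyRange 1 ((pvRunLen rest : Int) + 1) 1).map (fun t => pvG t.toNat 0)).sum
       | some b => ((PySem.List.pyRange 1 ((pvRunLen rest : Int) + 2) 1).map (fun t => pvG t.toNat b)).sum)
      + pvLoopB (rest.drop (pvRunLen rest)) prev
termination_by l _ => l.length
decreasing_by
  · simp
  · simp

def part_three_alt (data : String) : Int :=
  pvLoopB (data.toList.map pvValB) none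

-- ===== PRECONDITION & SPEC =====
def Spec_part_three (data : String) (out : Int) : Prop := out = part_three_alt data
instance (data : String) (out : Int) : Decidable (Spec_part_three data out) := by unfold Spec_part_three; infer_instance

-- ===== CLAIM =====
def Claim_equal_part_three : Prop := ∀ (data : String), Dom_part_three data → Spec_part_three data (part_three data)

-- ===== LEMMAS AND PROOFS =====

-- one application of the repair recurrence, in modular form
def pvNext (b : Int) : Int := PySem.Int.mod (b * 2 - 6) 52 + 1

-- k-fold iteration of the repair recurrence
def pvIter : Nat → Int → Int
  | 0, b => b
  | k + 1, b => pvNext (pvIter k b)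

-- sum of the first k iterates (t = 1 .. k)
def pvIterSum : Nat → Int → Int
  | 0, _ => 0
  | k + 1, b => pvIterSum k b + pvIter (k + 1) b

-- per-character reference recurrence shared by both proofs
def pvRef : List Char → Option Int → Int
  | [], _ => 0
  | c :: rest, prev =>
    let p := match pvValB c with
      | some v => v
      | none => match prev with | none => 0 | some b => pvNext b
    p + pvRef rest (some p)

theorem pvFixUp_eq (v : Int) (h : v ≤ 52) : pvFixUp v = PySem.Int.mod (v - 1) 52 + 1 := by
  induction v using pvFixUp.induct with
  | case1 v hv ih =>
    rw [pvFixUp, if_pos hv, ih (by omega), PySem.Int.mod_eq_emod_of_pos (by norm_num),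
        PySem.Int.mod_eq_emod_of_pos (by norm_num)]
    omega
  | case2 v hv =>
    rw [pvFixUp, if_neg hv, PySem.Int.mod_eq_emod_of_pos (by norm_num)]
    omega

theorem pvFixDown_eq (v : Int) (h : 1 ≤ v) : pvFixDown v = PySem.Int.mod (v - 1) 52 + 1 := by
  induction v using pvFixDown.induct with
  | case1 v hv ih =>
    rw [pvFixDown, if_pos hv, ih (by omega), PySem.Int.mod_eq_emod_of_pos (by norm_num),
        PySem.Int.mod_eq_emod_of_pos (by norm_num)]
    omega
  | case2 v hv =>
    rw [pvFixDown, if_neg hv, PySem.Int.mod_eq_emod_of_pos (by norm_num)]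
    omega

theorem pvFix_eq (p : Int) : pvFixCorruptedChar p = pvNext p := by
  unfold pvFixCorruptedChar pvNext
  by_cases hv : p * 2 - 5 < 1
  · rw [pvFixUp, if_pos hv, pvFixUp_eq (p * 2 - 5 + 52) (by omega)]
    have h1 : (0:Int) < 52 := by norm_num
    rw [pvFixDown, if_neg (by
      have := PySem.Int.mod_lt (p * 2 - 5 + 52 - 1) h1; omega)]
    rw [PySem.Int.mod_eq_emod_of_pos h1, PySem.Int.mod_eq_emod_of_pos h1]
    omega
  · rw [pvFixUp, if_neg hv, pvFixDown_eq (p * 2 - 5) (by omega),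
        PySem.Int.mod_eq_emod_of_pos (by norm_num), PySem.Int.mod_eq_emod_of_pos (by norm_num)]
    omega

theorem pvLB_islower (c : Char) (h2 : PySem.Chars.islower c = true) : 97 ≤ c.toNat := by
  rw [PySem.Chars.islower, Bool.and_eq_true, decide_eq_true_eq, decide_eq_true_eq] at h2
  have h := h2.1
  rw [Char.le_def, UInt32.le_iff_toNat_le] at h
  exact h

theorem pvLB_isupper (c : Char) (h2 : PySem.Chars.isupper c = true) : 65 ≤ c.toNat := by
  rw [PySem.Chars.isupper, Bool.and_eq_true, decide_eq_true_eq, decide_eq_true_eq] at h2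
  have h := h2.1
  rw [Char.le_def, UInt32.le_iff_toNat_le] at h
  exact h

theorem getD_length_sub_one (xs : List Int) (d : Int) :
    xs.getD (xs.length - 1) d = xs.getLastD d := by
  simp [List.getD, List.getLastD_eq_getLast?, List.getLast?_eq_getElem?]

-- ===== A = pvRef =====
theorem pvA_eq_ref (l : List Char) : ∀ (values : List Int),
    ((PySem.List.enumerate l (values.length : Int)).foldl pvStepA values).sum
      = values.sum + pvRef l values.getLast? := by
  induction l with
  | nil => intro values; simp [PySem.List.enumerate, pvRef]
  | cons c cs ih =>
    intro values
    rw [PySem.List.enumerate_cons, List.foldl_cons]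
    have step : ∃ p' : Int,
        pvStepA values ((values.length : Int), c) = values ++ [p'] ∧
        (match pvValB c with
          | some v => v
          | none => match values.getLast? with | none => 0 | some b => pvNext b) = p' := by
      by_cases hl : PySem.Chars.islower c
      · have hb : 97 ≤ c.toNat := pvLB_islower c hl
        have hgt : 96 < c.toNat := by omega
        exact ⟨(c.toNat : Int) - 96, by simp [pvStepA, pvGetCharValue, hl, hgt],
          by simp [pvValB, hl]⟩
      · by_cases hu : PySem.Chars.isupper c
        · have hb : 65 ≤ c.toNat := pvLB_isupper c hu
          have hgt : 38 < c.toNat := by omega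
          exact ⟨(c.toNat : Int) - 38, by simp [pvStepA, pvGetCharValue, hl, hu, hgt],
            by simp [pvValB, hl, hu]⟩
        · rcases eq_or_ne values [] with hv | hv
          · exact ⟨0, by simp [pvStepA, pvGetCharValue, hl, hu, hv],
              by simp [pvValB, hl, hu, hv]⟩
          · obtain ⟨x, hx⟩ : ∃ x, values.getLast? = some x := by
              cases hxx : values.getLast? with
              | none => exact absurd (List.getLast?_eq_none_iff.mp hxx) hv
              | some x => exact ⟨x, rfl⟩
            have hlen : 0 < values.length := List.length_pos_iff.mpr hv
            refine ⟨pvNext x, ?_, by simp [pvValB, hl, hu, hx]⟩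
            have hidx : ((values.length : Int) - 1) = ((values.length - 1 : Nat) : Int) := by
              omega
            simp only [pvStepA, pvGetCharValue, hl, hu]
            rw [if_neg (by norm_num), if_pos ⟨by exact_mod_cast hlen, hv⟩, hidx,
                PySem.List.pyGetD_natCast, getD_length_sub_one, List.getLastD_eq_getLast?, hx,
                Option.getD_some, pvFix_eq]
    obtain ⟨p', hA, hp⟩ := step
    rw [hA]
    have hlen : ((values ++ [p']).length : Int) = (values.length : Int) + 1 := by simp
    have h2 := ih (values ++ [p'])
    rw [hlen] at h2
    rw [h2]
    simp only [pvRef, ← hp]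
    simp
    omega

-- ===== B = pvRef =====
theorem pvIter_shift (k : Nat) (b : Int) : pvIter k (pvNext b) = pvIter (k + 1) b := by
  induction k with
  | zero => rfl
  | succ k ih => rw [pvIter, ih]; rfl

theorem pvIterSum_front (k : Nat) (b : Int) :
    pvIterSum (k + 1) b = pvNext b + pvIterSum k (pvNext b) := by
  induction k generalizing b with
  | zero => simp [pvIterSum, pvIter]
  | succ k ih =>
    rw [pvIterSum, ih, pvIterSum, pvIter_shift]
    ring

theorem pvG_eq_iter (k : Nat) (b : Int) : pvG (k + 1) b = pvIter (k + 1) b := by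
  induction k generalizing b with
  | zero =>
    show PySem.Int.mod (PySem.Int.powMod 2 1 52 * (b - 5) + 4) 52 + 1 = pvNext b
    have h2 : PySem.Int.powMod 2 1 52 = 2 := by decide
    rw [h2, pvNext]
    have : (2:Int) * (b - 5) + 4 = b * 2 - 6 := by ring
    rw [this]
  | succ k ih =>
    rw [pvIter, ← ih]
    show PySem.Int.mod (PySem.Int.powMod 2 (k+2) 52 * (b - 5) + 4) 52 + 1
        = PySem.Int.mod ((PySem.Int.mod (PySem.Int.powMod 2 (k+1) 52 * (b - 5) + 4) 52 + 1) * 2 - 6) 52 + 1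
    unfold PySem.Int.powMod
    rw [PySem.Int.mod_eq_emod_of_pos (b := 52) (by norm_num),
        PySem.Int.mod_eq_emod_of_pos (b := 52) (by norm_num),
        PySem.Int.mod_eq_emod_of_pos (b := 52) (by norm_num),
        PySem.Int.mod_eq_emod_of_pos (b := 52) (by norm_num),
        PySem.Int.mod_eq_emod_of_pos (b := 52) (by norm_num)]
    have key : ((2:Int)^(k+2) % 52 * (b - 5) + 4) % 52
        = ((((2:Int)^(k+1) % 52 * (b - 5) + 4) % 52 + 1) * 2 - 6) % 52 := by
      have m1 : ((2:Int)^(k+2) % 52) ≡ (2:Int)^(k+2) [ZMOD 52] :=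
        Int.emod_emod_of_dvd _ dvd_rfl
      have m2 : ((2:Int)^(k+1) % 52) ≡ (2:Int)^(k+1) [ZMOD 52] :=
        Int.emod_emod_of_dvd _ dvd_rfl
      have e1 : ((2:Int)^(k+2) % 52 * (b - 5) + 4) ≡ (2:Int)^(k+2) * (b - 5) + 4 [ZMOD 52] :=
        (m1.mul_right (b - 5)).add_right 4
      have h0 : (((2:Int)^(k+1) % 52 * (b - 5) + 4) % 52) ≡ (2:Int)^(k+1) * (b - 5) + 4 [ZMOD 52] :=
        (Int.emod_emod_of_dvd _ dvd_rfl :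
            (((2:Int)^(k+1) % 52 * (b - 5) + 4) % 52) ≡ ((2:Int)^(k+1) % 52 * (b - 5) + 4) [ZMOD 52]).trans
          ((m2.mul_right (b - 5)).add_right 4)
      have e2 : (((2:Int)^(k+1) % 52 * (b - 5) + 4) % 52 + 1) * 2 - 6
          ≡ ((2:Int)^(k+1) * (b - 5) + 4 + 1) * 2 - 6 [ZMOD 52] :=
        ((h0.add_right 1).mul_right 2).sub_right 6
      have e3 : (2:Int)^(k+2) * (b - 5) + 4 = ((2:Int)^(k+1) * (b - 5) + 4 + 1) * 2 - 6 := by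
        rw [pow_succ]
        ring
      calc ((2:Int)^(k+2) % 52 * (b - 5) + 4) % 52
          = ((2:Int)^(k+2) * (b - 5) + 4) % 52 := e1
        _ = (((2:Int)^(k+1) * (b - 5) + 4 + 1) * 2 - 6) % 52 := by rw [e3]
        _ = ((((2:Int)^(k+1) % 52 * (b - 5) + 4) % 52 + 1) * 2 - 6) % 52 := e2.symm
    rw [key]

theorem sum_pyRange_pvG (k : Nat) (b : Int) :
    ((PySem.List.pyRange 1 ((k : Int) + 1) 1).map (fun t => pvG t.toNat b)).sum
      = pvIterSum k b := by
  induction k with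
  | zero => rw [show ((0:Nat):Int) + 1 = 1 by norm_num, PySem.List.pyRange_one_eq_nil le_rfl]; rfl
  | succ k ih =>
    have hr : PySem.List.pyRange 1 (((k+1 : Nat) : Int) + 1) 1
        = PySem.List.pyRange 1 ((k : Int) + 1) 1 ++ [(k : Int) + 1] := by
      have := PySem.List.pyRange_one_succ_right (a := 1) (b := (k : Int) + 1) (by omega)
      push_cast
      push_cast at this
      exact this
    rw [hr, List.map_append, List.sum_append, ih]
    have ht : ((k : Int) + 1).toNat = k + 1 := by omega
    simp only [List.map_cons, List.map_nil, List.sum_cons, List.sum_nil, ht]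
    rw [pvG_eq_iter]
    simp [pvIterSum]

-- after dropping a maximal run, the head is a letter (or the list is empty)
theorem runLen_drop (m : List (Option Int)) :
    m.drop (pvRunLen m) = [] ∨ ∃ v tl, m.drop (pvRunLen m) = some v :: tl := by
  induction m with
  | nil => exact Or.inl rfl
  | cons x tl ih =>
    cases x with
    | none => simpa [pvRunLen] using ih
    | some v => exact Or.inr ⟨v, tl, rfl⟩

-- pvRef ignores prev when the list is empty or starts with a letter
theorem pvRef_indep (l : List Char) (p q : Option Int)
    (h : l = [] ∨ ∃ c tl v, l = c :: tl ∧ pvValB c = some v) : pvRef l p = pvRef l q := by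
  rcases h with h | ⟨c, tl, v, rfl, hc⟩
  · subst h; rfl
  · simp [pvRef, hc]

-- a maximal corrupted run under pvRef, summed by iterates
theorem pvRef_run (rest : List Char) : ∀ b : Int,
    pvRef rest (some b)
      = pvIterSum (pvRunLen (rest.map pvValB)) b
        + pvRef (rest.drop (pvRunLen (rest.map pvValB))) (some (pvIter (pvRunLen (rest.map pvValB)) b)) := by
  induction rest with
  | nil => intro b; simp [pvRunLen, pvIterSum, pvIter, pvRef]
  | cons c tl ih =>
    intro b
    cases hc : pvValB c with
    | some v => simp [pvRunLen, hc, pvIterSum, pvIter]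
    | none =>
      have hrl : pvRunLen ((c :: tl).map pvValB) = pvRunLen (tl.map pvValB) + 1 := by
        simp [pvRunLen, hc]
      rw [hrl]
      have hdrop : (c :: tl).drop (pvRunLen (tl.map pvValB) + 1) = tl.drop (pvRunLen (tl.map pvValB)) := rfl
      rw [hdrop, pvIterSum_front, ← pvIter_shift]
      have hstep : pvRef (c :: tl) (some b) = pvNext b + pvRef tl (some (pvNext b)) := by
        simp [pvRef, hc]
      rw [hstep, ih (pvNext b)]
      ring

theorem pvB_aux (n : Nat) : ∀ (l : List Char), l.length ≤ n → ∀ (prev : Option Int),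
    pvLoopB (l.map pvValB) prev = pvRef l prev := by
  induction n with
  | zero =>
    intro l hl prev
    rw [List.length_eq_zero_iff.mp (Nat.le_zero.mp hl)]
    simp [pvLoopB, pvRef]
  | succ n ih =>
    intro l hl prev
    cases l with
    | nil => simp [pvLoopB, pvRef]
    | cons c rest =>
      have hrest : rest.length ≤ n := by simpa using hl
      cases hc : pvValB c with
      | some v =>
        simp only [List.map_cons, hc, pvLoopB]
        rw [ih rest hrest (some v)]
        simp [pvRef, hc]
      | none =>
        set k := pvRunLen (rest.map pvValB) with hk
        have hmapdrop : (rest.map pvValB).drop k = (rest.drop k).map pvValB := by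
          rw [List.map_drop]
        have hlen2 : (rest.drop k).length ≤ n :=
          le_trans (by simp) hrest
        have hhead : rest.drop k = [] ∨ ∃ c' tl v, rest.drop k = c' :: tl ∧ pvValB c' = some v := by
          rcases runLen_drop (rest.map pvValB) with h | ⟨v, tl, h⟩
          · rw [hmapdrop] at h
            exact Or.inl (List.map_eq_nil_iff.mp h)
          · rw [hmapdrop] at h
            cases hd : rest.drop k with
            | nil => rw [hd] at h; simp at h
            | cons c' tl' =>
              rw [hd] at h
              simp only [List.map_cons, List.cons.injEq] at h
              exact Or.inr ⟨c', tl', v, rfl, h.1⟩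
        cases prev with
        | none =>
          simp only [List.map_cons, hc, pvLoopB, ← hk, hmapdrop]
          rw [ih (rest.drop k) hlen2 none, sum_pyRange_pvG]
          have href : pvRef (c :: rest) none = 0 + pvRef rest (some 0) := by
            simp [pvRef, hc]
          rw [href, pvRef_run rest 0, ← hk, zero_add,
              pvRef_indep (rest.drop k) (some (pvIter k 0)) none hhead]
        | some b =>
          simp only [List.map_cons, hc, pvLoopB, ← hk, hmapdrop]
          rw [ih (rest.drop k) hlen2 (some b)]
          have hcast : ((k : Int) + 2) = (((k + 1 : Nat) : Int) + 1) := by push_cast; ring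
          rw [hcast, sum_pyRange_pvG (k + 1) b]
          have hrl : pvRunLen ((c :: rest).map pvValB) = k + 1 := by
            simp [pvRunLen, hc, hk]
          have := pvRef_run (c :: rest) b
          rw [hrl] at this
          have hdrop : (c :: rest).drop (k + 1) = rest.drop k := rfl
          rw [hdrop] at this
          rw [this, pvRef_indep (rest.drop k) (some (pvIter (k+1) b)) (some b) hhead]

-- ===== VERDICT =====
theorem part_three_spec : Claim_equal_part_three := by
  intro data _
  unfold Spec_part_three part_three part_three_alt
  rw [pvB_aux data.toList.length data.toList le_rfl none]
  have := pvA_eq_ref data.toList []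
  simpa using this
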